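-- pv_equiv track=rewrite | github.com/Ankit-11-here/AI-Dungeon-Game | enemy.py | bfs_next_step
-- ===== SOURCE A (Python) =====
-- from collections import deque
--
-- def bfs_next_step(grid, start, target):
--     rows, cols = len(grid), len(grid[0])
--
--     start = tuple(start)
--     target = tuple(target)
--
--     queue = deque([start])
--     visited = set([start])
--     parent = {}
--
--     directions = [(1,0), (-1,0), (0,1), (0,-1)]
--
--     while queue:
--         r, c = queue.popleft()
--
--         #If target reached → backtrack safely
--         if (r, c) == target:
--             # If target is same as start
--             if target == start:
--                 return list(start)
--
--             # Backtrack to find next step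
--             while parent.get((r, c)) != start:
--                 if (r, c) not in parent:
--                     return list(start)  # safety check
--                 r, c = parent[(r, c)]
--
--             return [r, c]
--
--         # Explore neighbors
--         for dr, dc in directions:
--             nr = r + dr
--             nc = c + dc
--
--             # No wrap-around
--             if 0 <= nr < rows and 0 <= nc < cols:
--                 if grid[nr][nc] != '#' and (nr, nc) not in visited:
--                     visited.add((nr, nc))
--                     parent[(nr, nc)] = (r, c)
--                     queue.append((nr, nc))
--
--     #  If target unreachable → stay in same position
--     return list(start)
-- ===== SOURCE B (Python) =====
-- from collections import deque
--
-- def bfs_next_step(grid, start, target):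
--     rows, cols = len(grid), len(grid[0])
--
--     start = tuple(start)
--     target = tuple(target)
--
--     if target == start:
--         return list(start)
--
--     # Thread the first move through the queue itself: each entry is
--     # (cell, first step taken from start to reach it).  No parent map,
--     # no backtracking: the answer is ready the moment the target is seen.
--     queue = deque([(start, None)])
--     visited = {start}
--
--     while queue:
--         (r, c), first = queue.popleft()
--         for dr, dc in ((1, 0), (-1, 0), (0, 1), (0, -1)):
--             n = (r + dr, c + dc)
--             if 0 <= n[0] < rows and 0 <= n[1] < cols:
--                 if grid[n[0]][n[1]] != '#' and n not in visited:
--                     f = n if first is None else first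
--                     if n == target:
--                         return list(f)
--                     visited.add(n)
--                     queue.append((n, f))
--
--     return list(start)
-- ===== Notes on version B (the rewrite author's own statement) =====
-- stated objective: alternative
-- what changed: B threads the first move from start through the queue entries themselves and returns it the moment the target is discovered, eliminating A's parent map and its whole backtracking reconstruction loop (A answers when the target is popped, B when it is first seen; proved to be the same value).
-- outside the precondition, e.g. on bfs_next_step([['.'], []], [0, 0], [0, 0]): A returns [0, 0], B returns [0, 0]
import Mathlib
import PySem

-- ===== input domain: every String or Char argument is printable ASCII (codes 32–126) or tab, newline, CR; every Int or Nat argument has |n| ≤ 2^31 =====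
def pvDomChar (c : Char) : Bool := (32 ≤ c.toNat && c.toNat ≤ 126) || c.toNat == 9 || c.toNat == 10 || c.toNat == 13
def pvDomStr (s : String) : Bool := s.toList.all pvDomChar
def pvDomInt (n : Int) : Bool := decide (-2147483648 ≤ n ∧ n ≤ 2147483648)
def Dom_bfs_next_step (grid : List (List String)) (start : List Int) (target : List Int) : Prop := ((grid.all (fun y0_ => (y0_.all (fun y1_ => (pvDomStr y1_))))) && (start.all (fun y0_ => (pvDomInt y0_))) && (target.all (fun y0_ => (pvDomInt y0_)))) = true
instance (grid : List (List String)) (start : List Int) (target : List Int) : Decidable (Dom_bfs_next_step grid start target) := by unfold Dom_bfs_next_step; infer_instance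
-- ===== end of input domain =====

-- B carries the first move from start inside each queue entry and answers the moment the target
-- is discovered, so A's parent map and its backtracking reconstruction loop disappear.

-- ===== PORT A =====
-- grid[r][c]; exact inside Pre_ (0 ≤ r < rows, 0 ≤ c < cols ≤ row length); the "#" default is
-- only ever produced outside Pre_ (where the Python raises IndexError).
def pvCellA (grid : List (List String)) (r c : Int) : String :=
  ((PySem.List.pyGet? grid r).bind (fun row => PySem.List.pyGet? row c)).getD "#"

def pvDirsA : List (Int × Int) := [(1, 0), (-1, 0), (0, 1), (0, -1)]

-- the backtracking loop: while parent.get((r,c)) != start: if (r,c) not in parent: return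
-- list(start); r,c = parent[(r,c)].  Fuel size+1 always suffices (the parent chains are
-- strictly shorter than the dict).
def pvBacktrackA (par : PySem.Dict (Int × Int) (Int × Int)) (start : Int × Int) :
    Nat → (Int × Int) → List Int
  | 0, _ => [start.1, start.2]
  | fuel + 1, rc =>
    match PySem.Dict.get? par rc with
    | none => [start.1, start.2]            -- A's "safety check"
    | some p => if p = start then [rc.1, rc.2] else pvBacktrackA par start fuel p

-- one neighbour (nr,nc) of the popped cell rc; state = (queue tail, visited, parent)
def pvStepA (grid : List (List String)) (rows cols : Int) (rc : Int × Int)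
    (st : List (Int × Int) × PySem.Set (Int × Int) × PySem.Dict (Int × Int) (Int × Int))
    (d : Int × Int) :
    List (Int × Int) × PySem.Set (Int × Int) × PySem.Dict (Int × Int) (Int × Int) :=
  let n : Int × Int := (rc.1 + d.1, rc.2 + d.2)
  if 0 ≤ n.1 ∧ n.1 < rows ∧ 0 ≤ n.2 ∧ n.2 < cols then
    if pvCellA grid n.1 n.2 ≠ "#" ∧ ¬ (PySem.Set.contains st.2.1 n = true) then
      (st.1 ++ [n], PySem.Set.add st.2.1 n, PySem.Dict.insert st.2.2 n rc)
    else st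
  else st

def pvLoopA (grid : List (List String)) (rows cols : Int) (start : Int × Int)
    (tgt? : Option (Int × Int)) :
    Nat → List (Int × Int) → PySem.Set (Int × Int) →
    PySem.Dict (Int × Int) (Int × Int) → List Int
  | 0, _, _, _ => [start.1, start.2]
  | _ + 1, [], _, _ => [start.1, start.2]
  | fuel + 1, rc :: qs, vis, par =>
    if tgt? = some rc then
      if tgt? = some start then [start.1, start.2]
      else pvBacktrackA par start (PySem.Dict.size par + 1) rc
    else
      let st := pvDirsA.foldl (pvStepA grid rows cols rc) (qs, vis, par)
      pvLoopA grid rows cols start tgt? fuel st.1 st.2.1 st.2.2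

def bfs_next_step (grid : List (List String)) (start : List Int) (target : List Int) : List Int :=
  match start with
  | [sr, sc] =>
    let s : Int × Int := (sr, sc)
    let tgt? : Option (Int × Int) := match target with | [a, b] => some (a, b) | _ => none
    pvLoopA grid grid.length (grid.headD []).length s tgt?
      (grid.length * (grid.headD []).length + 2) [s] (PySem.Set.ofList [s]) PySem.Dict.empty
  | _ => start    -- start of length ≠ 2: Python raises on unpacking (outside Pre_)

-- ===== PORT B =====
-- grid[r][c]; exact inside Pre_, as on the A side
def pvCellB (grid : List (List String)) (r c : Int) : String :=
  ((PySem.List.pyGet? grid r).bind (fun row => PySem.List.pyGet? row c)).getD "#"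

-- f = n if first is None else first
def pvFirstB (first : Option (Int × Int)) (n : Int × Int) : Int × Int :=
  match first with | none => n | some m => m

-- the inner 'for dr, dc in ((1,0),(-1,0),(0,1),(0,-1))' with its early 'return list(f)':
-- .inl f = that return fired, .inr = the loop finished with the updated (queue, visited).
-- The queue holds (cell, first move from start to it); the start entry carries none.
def pvScanB (grid : List (List String)) (rows cols : Int) (tgt? : Option (Int × Int))
    (rc : Int × Int) (first : Option (Int × Int)) :
    List (Int × Int) → List ((Int × Int) × Option (Int × Int)) → PySem.Set (Int × Int) →
    Sum (Int × Int) (List ((Int × Int) × Option (Int × Int)) × PySem.Set (Int × Int))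
  | [], q, vis => .inr (q, vis)
  | d :: ds, q, vis =>
    let n : Int × Int := (rc.1 + d.1, rc.2 + d.2)
    if 0 ≤ n.1 ∧ n.1 < rows ∧ 0 ≤ n.2 ∧ n.2 < cols then
      if pvCellB grid n.1 n.2 ≠ "#" ∧ ¬ (PySem.Set.contains vis n = true) then
        let f : Int × Int := pvFirstB first n
        if tgt? = some n then .inl f
        else pvScanB grid rows cols tgt? rc first ds (q ++ [(n, some f)]) (PySem.Set.add vis n)
      else pvScanB grid rows cols tgt? rc first ds q vis
    else pvScanB grid rows cols tgt? rc first ds q vis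

def pvLoopB (grid : List (List String)) (rows cols : Int) (start : Int × Int)
    (tgt? : Option (Int × Int)) :
    Nat → List ((Int × Int) × Option (Int × Int)) → PySem.Set (Int × Int) → List Int
  | 0, _, _ => [start.1, start.2]
  | _ + 1, [], _ => [start.1, start.2]
  | fuel + 1, (rc, first) :: qs, vis =>
    match pvScanB grid rows cols tgt? rc first [(1, 0), (-1, 0), (0, 1), (0, -1)] qs vis with
    | .inl f => [f.1, f.2]
    | .inr (q', vis') => pvLoopB grid rows cols start tgt? fuel q' vis'

-- a 2-tuple view of a list, none when it is not a pair
def pvPairB (xs : List Int) : Option (Int × Int) :=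
  if xs.length = 2 then some (xs.headD 0, (xs.drop 1).headD 0) else none

def bfs_next_step_alt (grid : List (List String)) (start : List Int) (target : List Int) : List Int :=
  match pvPairB start with
  | some s =>
    match pvPairB target with
    | some t =>
      if t = s then [s.1, s.2]
      else pvLoopB grid grid.length (grid.headD []).length s (some t)
        (grid.length * (grid.headD []).length + 2) [(s, none)] (PySem.Set.ofList [s])
    | none =>
      -- target of length ≠ 2: 'target == start' is false and 'n == target' never fires
      pvLoopB grid grid.length (grid.headD []).length s none
        (grid.length * (grid.headD []).length + 2) [(s, none)] (PySem.Set.ofList [s])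
  | none => start    -- start of length ≠ 2: Python raises on unpacking (outside Pre_)

-- ===== PRECONDITION & SPEC =====
-- Pre_ excludes exactly the inputs on which A raises: an empty grid (grid[0] → IndexError), a
-- start that is not a pair (unpacking → ValueError), and — conservatively, since a closed-form
-- condition cannot see BFS reachability — grids with a row shorter than row 0 (grid[nr][nc] →
-- IndexError whenever BFS reaches such a row); this last clause also drops some ragged grids on
-- which A happens to return because the short row is never reached.
def Pre_bfs_next_step (grid : List (List String)) (start : List Int) (target : List Int) : Prop :=
  grid ≠ [] ∧ start.length = 2 ∧ ∀ row ∈ grid, (grid.headD []).length ≤ row.length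

instance (grid : List (List String)) (start : List Int) (target : List Int) :
    Decidable (Pre_bfs_next_step grid start target) := by
  unfold Pre_bfs_next_step; infer_instance

def pvWitness_bfs_next_step : List (List String) × List Int × List Int :=
  ([[".", "."], [".", "#"]], [0, 0], [1, 0])

def Spec_bfs_next_step (grid : List (List String)) (start : List Int) (target : List Int) (out : List Int) : Prop := out = bfs_next_step_alt grid start target
instance (grid : List (List String)) (start : List Int) (target : List Int) (out : List Int) : Decidable (Spec_bfs_next_step grid start target out) := by unfold Spec_bfs_next_step; infer_instance

-- ===== CLAIM (what is proved, stated in full; the proofs are below) =====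
def Claim_equal_bfs_next_step : Prop := ∀ (grid : List (List String)) (start : List Int) (target : List Int), Dom_bfs_next_step grid start target → Pre_bfs_next_step grid start target → Spec_bfs_next_step grid start target (bfs_next_step grid start target)

-- ===== LEMMAS AND PROOFS =====

-- in-bounds cells
def pvInB (rows cols : Int) (k : Int × Int) : Prop :=
  0 ≤ k.1 ∧ k.1 < rows ∧ 0 ≤ k.2 ∧ k.2 < cols

-- ChainFM par start d k f: following parent pointers from k for d+1 steps reaches start, every
-- intermediate node is ≠ start, and f is the last node before start (the first move).
def pvChainFM (par : PySem.Dict (Int × Int) (Int × Int)) (start : Int × Int) :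
    Nat → (Int × Int) → (Int × Int) → Prop
  | 0, k, f => PySem.Dict.get? par k = some start ∧ f = k
  | d + 1, k, f => ∃ p, PySem.Dict.get? par k = some p ∧ p ≠ start ∧ pvChainFM par start d p f

-- A-side good state: visited = {start} ∪ dom(parent); parent keys in bounds and unique
def pvGS (rows cols : Int) (start : Int × Int) (vis : PySem.Set (Int × Int))
    (par : PySem.Dict (Int × Int) (Int × Int)) : Prop :=
  (∀ k, PySem.Set.contains vis k = true ↔ (k = start ∨ (PySem.Dict.get? par k).isSome)) ∧
  (∀ k, (PySem.Dict.get? par k).isSome → pvInB rows cols k) ∧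
  (PySem.Dict.keys par).Nodup

-- B-queue entries are coherent with A's parent dict
def pvQOK (par : PySem.Dict (Int × Int) (Int × Int)) (start : Int × Int)
    (qB : List ((Int × Int) × Option (Int × Int))) : Prop :=
  ∀ p ∈ qB, (p.2 = none ↔ p.1 = start) ∧
    ∀ f, p.2 = some f → ∃ d, d < PySem.Dict.size par ∧ pvChainFM par start d p.1 f

-- the target (if any) is not start and not yet visited
def pvTF (tgt? : Option (Int × Int)) (start : Int × Int) (vis : PySem.Set (Int × Int)) : Prop :=
  ∀ t, tgt? = some t → t ≠ start ∧ PySem.Set.contains vis t = false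

theorem pvCellB_eq : pvCellB = pvCellA := rfl

theorem pvBacktrackA_chain {par : PySem.Dict (Int × Int) (Int × Int)} {start : Int × Int} :
    ∀ {d : Nat} {k f : Int × Int}, pvChainFM par start d k f →
    ∀ fu, d < fu → pvBacktrackA par start fu k = [f.1, f.2] := by
  intro d
  induction d with
  | zero =>
    intro k f h fu hf
    obtain ⟨hp, rfl⟩ := h
    obtain ⟨f', rfl⟩ := Nat.exists_eq_succ_of_ne_zero (Nat.pos_iff_ne_zero.mp hf)
    simp [pvBacktrackA, hp]
  | succ d ih =>
    intro k f h fu hf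
    obtain ⟨p, hp, hps, hch⟩ := h
    obtain ⟨f', rfl⟩ := Nat.exists_eq_succ_of_ne_zero
      (Nat.pos_iff_ne_zero.mp (Nat.lt_of_le_of_lt (Nat.zero_le _) hf))
    simp [pvBacktrackA, hp, hps]
    exact ih hch f' (Nat.lt_of_succ_lt_succ hf)

theorem pvChainFM_mono {par : PySem.Dict (Int × Int) (Int × Int)} {start n v : Int × Int}
    (hn : PySem.Dict.get? par n = none) :
    ∀ {d : Nat} {k f : Int × Int}, pvChainFM par start d k f →
    pvChainFM (PySem.Dict.insert par n v) start d k f := by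
  intro d
  induction d with
  | zero =>
    intro k f h
    refine ⟨?_, h.2⟩
    have hk : k ≠ n := by rintro rfl; rw [h.1] at hn; cases hn
    rw [PySem.Dict.get?_insert_of_ne _ _ hk]; exact h.1
  | succ d ih =>
    intro k f h
    obtain ⟨p, hp, hps, hch⟩ := h
    have hk : k ≠ n := by rintro rfl; rw [hp] at hn; cases hn
    exact ⟨p, by rw [PySem.Dict.get?_insert_of_ne _ _ hk]; exact hp, hps, ih hch⟩

-- any parent dict with unique in-bounds keys has at most rows*cols entries
theorem pvSize_le (R C : Nat) (par : PySem.Dict (Int × Int) (Int × Int))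
    (hb : ∀ k, (PySem.Dict.get? par k).isSome → pvInB (R : Int) (C : Int) k)
    (hnd : (PySem.Dict.keys par).Nodup) :
    PySem.Dict.size par ≤ R * C := by
  classical
  have hkeys : ∀ k ∈ PySem.Dict.keys par, pvInB (R : Int) (C : Int) k := by
    intro k hk
    apply hb
    rw [← PySem.Dict.contains_eq_isSome_get?]
    exact (PySem.Dict.contains_iff_mem_keys par k).mpr hk
  -- encode in-bounds cells injectively into Fin-range numbers
  set enc : Int × Int → Nat := fun k => k.1.toNat * C + k.2.toNat with henc
  have hmapnd : ((PySem.Dict.keys par).map enc).Nodup := by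
    refine List.Nodup.map_on ?_ hnd
    intro k hk k' hk' he
    obtain ⟨h1, h2, h3, h4⟩ := hkeys k hk
    obtain ⟨h1', h2', h3', h4'⟩ := hkeys k' hk'
    simp only [henc] at he
    have b2 : k.2.toNat < C := by omega
    have b2' : k'.2.toNat < C := by omega
    have hC : 0 < C := by omega
    have hdiv : (k.1.toNat * C + k.2.toNat) / C = k.1.toNat := by
      rw [Nat.mul_comm, Nat.mul_add_div hC, Nat.div_eq_of_lt b2]; omega
    have hdiv' : (k'.1.toNat * C + k'.2.toNat) / C = k'.1.toNat := by
      rw [Nat.mul_comm, Nat.mul_add_div hC, Nat.div_eq_of_lt b2']; omega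
    have e1 : k.1.toNat = k'.1.toNat := by rw [← hdiv, ← hdiv', he]
    have e2 : k.2.toNat = k'.2.toNat := by
      have := he; rw [e1] at this; omega
    exact Prod.ext (by omega) (by omega)
  have hlt : ∀ m ∈ (PySem.Dict.keys par).map enc, m < R * C := by
    intro m hm
    obtain ⟨k, hk, rfl⟩ := List.mem_map.mp hm
    obtain ⟨h1, h2, h3, h4⟩ := hkeys k hk
    have : k.1.toNat < R ∧ k.2.toNat < C := by omega
    calc k.1.toNat * C + k.2.toNat < k.1.toNat * C + C := by omega
    _ = (k.1.toNat + 1) * C := by ring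
    _ ≤ R * C := Nat.mul_le_mul_right _ this.1
  have hsub : ((PySem.Dict.keys par).map enc).toFinset ⊆ Finset.range (R * C) := by
    intro m hm
    exact Finset.mem_range.mpr (hlt m (List.mem_toFinset.mp hm))
  have hcard := Finset.card_le_card hsub
  rw [List.toFinset_card_of_nodup hmapnd, Finset.card_range, List.length_map] at hcard
  have : PySem.Dict.size par = (PySem.Dict.keys par).length := by
    simp [PySem.Dict.size, PySem.Dict.keys]
  omega

-- accepting a fresh in-bounds neighbour n with parent rc keeps the A-side state good
theorem pvGS_accept {rows cols : Int} {start n rc : Int × Int} {vis : PySem.Set (Int × Int)}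
    {par : PySem.Dict (Int × Int) (Int × Int)}
    (hgs : pvGS rows cols start vis par) (hbnd : pvInB rows cols n)
    (hfresh : ¬ (PySem.Set.contains vis n = true)) :
    PySem.Dict.get? par n = none ∧
    PySem.Dict.size (PySem.Dict.insert par n rc) = PySem.Dict.size par + 1 ∧
    pvGS rows cols start (PySem.Set.add vis n) (PySem.Dict.insert par n rc) ∧
    n ≠ start := by
  obtain ⟨hvis, hinb, hnd⟩ := hgs
  have hn : PySem.Dict.get? par n = none := by
    cases h : PySem.Dict.get? par n with
    | none => rfl
    | some v => exact absurd ((hvis n).mpr (Or.inr (by simp [h]))) hfresh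
  have hns : n ≠ start := fun h => hfresh ((hvis n).mpr (Or.inl h))
  refine ⟨hn, ?_, ⟨?_, ?_, PySem.Dict.nodup_keys_insert _ _ _ hnd⟩, hns⟩
  · rw [PySem.Dict.size_insert]
    rw [PySem.Dict.contains_eq_isSome_get?, hn]
    simp
  · intro k
    rw [PySem.Dict.get?_insert]
    constructor
    · intro hk
      rcases (PySem.Set.mem_add _ _ _).mp ((PySem.Set.contains_iff _ _).mp hk) with h | h
      · rcases (hvis k).mp ((PySem.Set.contains_iff _ _).mpr h) with h' | h'
        · exact Or.inl h'
        · right; split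
          · simp
          · exact h'
      · subst h; right; simp
    · intro hk
      apply (PySem.Set.contains_iff _ _).mpr
      apply (PySem.Set.mem_add _ _ _).mpr
      rcases hk with h | h
      · exact Or.inl ((PySem.Set.contains_iff _ _).mp ((hvis k).mpr (Or.inl h)))
      · by_cases hkn : k = n
        · exact Or.inr hkn
        · rw [if_neg hkn] at h
          exact Or.inl ((PySem.Set.contains_iff _ _).mp ((hvis k).mpr (Or.inr h)))
  · intro k hk
    rw [PySem.Dict.get?_insert] at hk
    by_cases hkn : k = n
    · subst hkn; exact hbnd
    · rw [if_neg hkn] at hk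
      exact hinb k hk

-- one pvStepA application preserves the A-side invariants
theorem pvStepA_pres (grid : List (List String)) (R C : Nat) (rc : Int × Int)
    (q : List (Int × Int)) (vis : PySem.Set (Int × Int))
    (par : PySem.Dict (Int × Int) (Int × Int)) (d : Int × Int)
    (hgs : pvGS (R : Int) (C : Int) start vis par) :
    let a := pvStepA grid (R : Int) (C : Int) rc (q, vis, par) d
    pvGS (R : Int) (C : Int) start a.2.1 a.2.2 ∧ (∃ l, a.1 = q ++ l) ∧
    a.1.length + PySem.Dict.size par = q.length + PySem.Dict.size a.2.2 ∧
    (∀ d' k f, pvChainFM par start d' k f → pvChainFM a.2.2 start d' k f) ∧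
    PySem.Dict.size par ≤ PySem.Dict.size a.2.2 := by
  intro a
  simp only [pvStepA, a]
  clear a
  by_cases hb1 : 0 ≤ rc.1 + d.1 ∧ rc.1 + d.1 < (R : Int) ∧ 0 ≤ rc.2 + d.2 ∧ rc.2 + d.2 < (C : Int)
  · simp only [if_pos hb1]
    by_cases hb2 : pvCellA grid (rc.1 + d.1) (rc.2 + d.2) ≠ "#" ∧
        ¬ (PySem.Set.contains vis (rc.1 + d.1, rc.2 + d.2) = true)
    · simp only [if_pos hb2]
      obtain ⟨hn, hsz, hgs', _⟩ :=
        pvGS_accept (n := (rc.1 + d.1, rc.2 + d.2)) (rc := rc) hgs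
          ⟨hb1.1, hb1.2.1, hb1.2.2.1, hb1.2.2.2⟩ hb2.2
      refine ⟨hgs', ⟨[(rc.1 + d.1, rc.2 + d.2)], rfl⟩, ?_,
        fun d' k f hc => pvChainFM_mono hn hc, by omega⟩
      simp only [List.length_append, List.length_cons, List.length_nil, hsz]
      omega
    · simp only [if_neg hb2]
      exact ⟨hgs, ⟨[], by simp⟩, by simp, fun _ _ _ h => h, le_refl _⟩
  · simp only [if_neg hb1]
    exact ⟨hgs, ⟨[], by simp⟩, by simp, fun _ _ _ h => h, le_refl _⟩

-- folding pvStepA over any direction list preserves the A-side invariants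
theorem pvFoldA_pres (grid : List (List String)) (R C : Nat) (start rc : Int × Int)
    (ds : List (Int × Int)) :
    ∀ (q : List (Int × Int)) (vis : PySem.Set (Int × Int))
      (par : PySem.Dict (Int × Int) (Int × Int)),
    pvGS (R : Int) (C : Int) start vis par →
    let a := ds.foldl (pvStepA grid (R : Int) (C : Int) rc) (q, vis, par)
    pvGS (R : Int) (C : Int) start a.2.1 a.2.2 ∧ (∃ l, a.1 = q ++ l) ∧
    a.1.length + PySem.Dict.size par = q.length + PySem.Dict.size a.2.2 ∧
    (∀ d' k f, pvChainFM par start d' k f → pvChainFM a.2.2 start d' k f) ∧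
    PySem.Dict.size par ≤ PySem.Dict.size a.2.2 := by
  induction ds with
  | nil =>
    intro q vis par hgs
    exact ⟨hgs, ⟨[], by simp⟩, by simp, fun _ _ _ h => h, le_refl _⟩
  | cons d ds ih =>
    intro q vis par hgs
    obtain ⟨hgs1, ⟨l1, hl1⟩, hlen1, hch1, hsz1⟩ := pvStepA_pres grid R C rc q vis par d hgs
    set s1 := pvStepA grid (R : Int) (C : Int) rc (q, vis, par) d with hs1
    have hsplit : s1 = (s1.1, s1.2.1, s1.2.2) := rfl
    obtain ⟨hgs2, ⟨l2, hl2⟩, hlen2, hch2, hsz2⟩ := ih s1.1 s1.2.1 s1.2.2 hgs1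
    rw [List.foldl_cons, ← hs1, hsplit]
    refine ⟨hgs2, ⟨l1 ++ l2, by rw [hl2, hl1, List.append_assoc]⟩, ?_, ?_, ?_⟩
    · omega
    · exact fun d' k f hc => hch2 d' k f (hch1 d' k f hc)
    · omega

-- once the target sits in A's queue with a recorded chain, A returns its first move
theorem pvTA (grid : List (List String)) (R C : Nat) (start t fb : Int × Int)
    (hts : t ≠ start) :
    ∀ (fu : Nat) (q : List (Int × Int)) (vis : PySem.Set (Int × Int))
      (par : PySem.Dict (Int × Int) (Int × Int)),
    pvGS (R : Int) (C : Int) start vis par →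
    t ∈ q →
    (∃ d, d < PySem.Dict.size par ∧ pvChainFM par start d t fb) →
    q.length + R * C ≤ fu + PySem.Dict.size par →
    pvLoopA grid (R : Int) (C : Int) start (some t) fu q vis par = [fb.1, fb.2] := by
  intro fu
  induction fu with
  | zero =>
    intro q vis par hgs ht hch hfu
    exfalso
    have hsz := pvSize_le R C par hgs.2.1 hgs.2.2
    have : q.length = 0 := by omega
    rw [List.length_eq_zero_iff] at this
    subst this
    exact (List.not_mem_nil).elim ht
  | succ fu ih =>
    intro q vis par hgs ht hch hfu
    cases q with
    | nil => exact (List.not_mem_nil).elim ht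
    | cons rc qs =>
      by_cases hrc : t = rc
      · subst hrc
        have h2 : ¬ ((some t : Option (Int × Int)) = some start) := by
          simp [hts]
        obtain ⟨d, hd, hchain⟩ := hch
        simp only [pvLoopA, if_neg h2]
        exact pvBacktrackA_chain hchain _ (by omega)
      · have hne : ¬ ((some t : Option (Int × Int)) = some rc) := by simp [hrc]
        simp only [pvLoopA, if_neg hne]
        obtain ⟨hgs', ⟨l, hl⟩, hlen, hchm, hszm⟩ :=
          pvFoldA_pres grid R C start rc pvDirsA qs vis par hgs
        set a := pvDirsA.foldl (pvStepA grid (R : Int) (C : Int) rc) (qs, vis, par) with ha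
        have hsplit : a = (a.1, a.2.1, a.2.2) := rfl
        obtain ⟨d, hd, hchain⟩ := hch
        apply ih a.1 a.2.1 a.2.2 hgs'
        · rw [hl]
          exact List.mem_append.mpr (Or.inl (by
            rcases List.mem_cons.mp ht with h | h
            · exact absurd h hrc
            · exact h))
        · exact ⟨d, by omega, hchm d t fb hchain⟩
        · simp only [List.length_cons] at hfu
          omega

-- the neighbour scan of one popped cell, in lockstep on both sides
theorem pvScan_sync (grid : List (List String)) (R C : Nat) (start : Int × Int)
    (tgt? : Option (Int × Int)) (rc : Int × Int) (first : Option (Int × Int)) :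
    ∀ (ds : List (Int × Int)) (qB : List ((Int × Int) × Option (Int × Int)))
      (vis : PySem.Set (Int × Int)) (par : PySem.Dict (Int × Int) (Int × Int)),
    pvGS (R : Int) (C : Int) start vis par →
    pvQOK par start qB →
    (∀ p ∈ qB, PySem.Set.contains vis p.1 = true) →
    pvTF tgt? start vis →
    (first = none ↔ rc = start) →
    (∀ f, first = some f → ∃ d, d < PySem.Dict.size par ∧ pvChainFM par start d rc f) →
    (match pvScanB grid (R : Int) (C : Int) tgt? rc first ds qB vis with
     | .inl fb =>
        let a := ds.foldl (pvStepA grid (R : Int) (C : Int) rc) (qB.map Prod.fst, vis, par)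
        ∃ t, tgt? = some t ∧ t ≠ start ∧ t ∈ a.1 ∧
          pvGS (R : Int) (C : Int) start a.2.1 a.2.2 ∧
          (∃ d, d < PySem.Dict.size a.2.2 ∧ pvChainFM a.2.2 start d t fb) ∧
          a.1.length + PySem.Dict.size par = qB.length + PySem.Dict.size a.2.2
     | .inr (qB', vis') =>
        let a := ds.foldl (pvStepA grid (R : Int) (C : Int) rc) (qB.map Prod.fst, vis, par)
        a.1 = qB'.map Prod.fst ∧ a.2.1 = vis' ∧
          pvGS (R : Int) (C : Int) start vis' a.2.2 ∧
          pvQOK a.2.2 start qB' ∧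
          (∀ p ∈ qB', PySem.Set.contains vis' p.1 = true) ∧
          pvTF tgt? start vis' ∧
          qB'.length + PySem.Dict.size par = qB.length + PySem.Dict.size a.2.2) := by
  intro ds
  induction ds with
  | nil =>
    intro qB vis par hgs hqok hqv htf hfi hfc
    simp only [pvScanB, List.foldl_nil]
    refine ⟨?_, ?_, hgs, hqok, hqv, htf, ?_⟩ <;> simp
  | cons d ds ih =>
    intro qB vis par hgs hqok hqv htf hfi hfc
    simp only [pvScanB, pvStepA, pvCellB_eq, List.foldl_cons]
    by_cases hb1 : 0 ≤ rc.1 + d.1 ∧ rc.1 + d.1 < (R : Int) ∧ 0 ≤ rc.2 + d.2 ∧ rc.2 + d.2 < (C : Int)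
    · simp only [if_pos hb1]
      by_cases hb2 : pvCellA grid (rc.1 + d.1) (rc.2 + d.2) ≠ "#" ∧
          ¬ (PySem.Set.contains vis (rc.1 + d.1, rc.2 + d.2) = true)
      · simp only [if_pos hb2]
        set n : Int × Int := (rc.1 + d.1, rc.2 + d.2) with hn
        obtain ⟨hfreshpar, hsz, hgs1, hnstart⟩ :=
          pvGS_accept (n := n) (rc := rc) hgs ⟨hb1.1, hb1.2.1, hb1.2.2.1, hb1.2.2.2⟩ hb2.2
        -- the first move recorded for n, and its chain in the updated parent dict
        have hchn : ∃ dd, dd < PySem.Dict.size (PySem.Dict.insert par n rc) ∧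
            pvChainFM (PySem.Dict.insert par n rc) start dd n (pvFirstB first n) := by
          cases first with
          | none =>
            have hrs : rc = start := hfi.mp rfl
            exact ⟨0, by omega, by
              refine ⟨?_, by simp [pvFirstB]⟩
              rw [PySem.Dict.get?_insert_self, hrs]⟩
          | some m =>
            have hrs : rc ≠ start := fun h => by
              have := hfi.mpr h; cases this
            obtain ⟨d0, hd0, hch0⟩ := hfc m rfl
            refine ⟨d0 + 1, by omega,
              ⟨rc, PySem.Dict.get?_insert_self _ _ _, hrs, ?_⟩⟩
            simpa [pvFirstB] using pvChainFM_mono hfreshpar hch0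
        by_cases htg : tgt? = some n
        · simp only [if_pos htg]
          obtain ⟨hgsf, ⟨l, hl⟩, hlenf, hchmf, hszf⟩ :=
            pvFoldA_pres grid R C start rc ds (qB.map Prod.fst ++ [n])
              (PySem.Set.add vis n) (PySem.Dict.insert par n rc) hgs1
          obtain ⟨dd, hdd, hchdd⟩ := hchn
          refine ⟨n, htg, hnstart, ?_, hgsf, ?_, ?_⟩
          · rw [hl]
            exact List.mem_append.mpr (Or.inl (List.mem_append.mpr (Or.inr (by simp))))
          · exact ⟨dd, by omega, hchmf dd n _ hchdd⟩
          · simp only [List.length_append, List.length_map, List.length_cons,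
              List.length_nil] at hlenf ⊢
            omega
        · simp only [if_neg htg]
          have hqok1 : pvQOK (PySem.Dict.insert par n rc) start
              (qB ++ [(n, some (pvFirstB first n))]) := by
            intro p hp
            rcases List.mem_append.mp hp with h | h
            · obtain ⟨hiff, hchp⟩ := hqok p h
              refine ⟨hiff, fun f hf => ?_⟩
              obtain ⟨d0, hd0, hch0⟩ := hchp f hf
              exact ⟨d0, by omega, pvChainFM_mono hfreshpar hch0⟩
            · rcases List.mem_singleton.mp h with rfl
              refine ⟨by simp [hnstart], fun f hf => ?_⟩
              obtain ⟨dd, hdd, hchdd⟩ := hchn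
              cases hf
              exact ⟨dd, hdd, hchdd⟩
          have hqv1 : ∀ p ∈ qB ++ [(n, some (pvFirstB first n))],
              PySem.Set.contains (PySem.Set.add vis n) p.1 = true := by
            intro p hp
            apply (PySem.Set.contains_iff _ _).mpr
            apply (PySem.Set.mem_add _ _ _).mpr
            rcases List.mem_append.mp hp with h | h
            · exact Or.inl ((PySem.Set.contains_iff _ _).mp (hqv p h))
            · rcases List.mem_singleton.mp h with rfl
              exact Or.inr rfl
          have htf1 : pvTF tgt? start (PySem.Set.add vis n) := by
            intro t' ht'
            obtain ⟨h1, h2⟩ := htf t' ht'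
            refine ⟨h1, ?_⟩
            have htn : t' ≠ n := fun h => htg (h ▸ ht')
            cases h : PySem.Set.contains (PySem.Set.add vis n) t' with
            | false => rfl
            | true =>
              rcases (PySem.Set.mem_add _ _ _).mp ((PySem.Set.contains_iff _ _).mp h) with
                hm | hm
              · rw [(PySem.Set.contains_iff _ _).mpr hm] at h2; cases h2
              · exact absurd hm htn
          have hfc1 : ∀ f, first = some f → ∃ d0, d0 < PySem.Dict.size
              (PySem.Dict.insert par n rc) ∧
              pvChainFM (PySem.Dict.insert par n rc) start d0 rc f := by
            intro f hf
            obtain ⟨d0, hd0, hch0⟩ := hfc f hf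
            exact ⟨d0, by omega, pvChainFM_mono hfreshpar hch0⟩
          have H := ih (qB ++ [(n, some (pvFirstB first n))])
            (PySem.Set.add vis n) (PySem.Dict.insert par n rc)
            hgs1 hqok1 hqv1 htf1 hfi hfc1
          rw [List.map_append] at H
          simp only [List.map_cons, List.map_nil] at H
          cases hscan : pvScanB grid (R : Int) (C : Int) tgt? rc first ds
              (qB ++ [(n, some (pvFirstB first n))])
              (PySem.Set.add vis n) with
          | inl fb =>
            rw [hscan] at H
            obtain ⟨t, ht, hts, htm, hgsf, hchf, hlenf⟩ := H
            refine ⟨t, ht, hts, htm, hgsf, hchf, ?_⟩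
            simp only [List.length_append, List.length_cons, List.length_nil] at hlenf ⊢
            omega
          | inr pr =>
            rw [hscan] at H
            obtain ⟨he1, he2, hgsf, hqokf, hqvf, htff, hlenf⟩ := H
            refine ⟨he1, he2, hgsf, hqokf, hqvf, htff, ?_⟩
            simp only [List.length_append, List.length_cons, List.length_nil] at hlenf ⊢
            omega
      · simp only [if_neg hb2]
        exact ih qB vis par hgs hqok hqv htf hfi hfc
    · simp only [if_neg hb1]
      exact ih qB vis par hgs hqok hqv htf hfi hfc

-- the two loops agree while B has not yet discovered the target
theorem pvLS (grid : List (List String)) (R C : Nat) (start : Int × Int)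
    (tgt? : Option (Int × Int)) :
    ∀ (fu : Nat) (qB : List ((Int × Int) × Option (Int × Int)))
      (vis : PySem.Set (Int × Int)) (par : PySem.Dict (Int × Int) (Int × Int)),
    pvGS (R : Int) (C : Int) start vis par →
    pvQOK par start qB →
    (∀ p ∈ qB, PySem.Set.contains vis p.1 = true) →
    pvTF tgt? start vis →
    qB.length + R * C ≤ fu + PySem.Dict.size par →
    pvLoopA grid (R : Int) (C : Int) start tgt? fu (qB.map Prod.fst) vis par =
      pvLoopB grid (R : Int) (C : Int) start tgt? fu qB vis := by
  intro fu
  induction fu with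
  | zero => intro qB vis par _ _ _ _ _; rfl
  | succ fu ih =>
    intro qB vis par hgs hqok hqv htf hfu
    cases qB with
    | nil => rfl
    | cons p qs =>
      obtain ⟨rc, first⟩ := p
      obtain ⟨hiff, hchf⟩ := hqok (rc, first) List.mem_cons_self
      have hneq : ¬ (tgt? = some rc) := by
        intro h
        obtain ⟨_, h2⟩ := htf rc h
        rw [hqv (rc, first) List.mem_cons_self] at h2
        cases h2
      simp only [List.map_cons, pvLoopA, pvLoopB, if_neg hneq]
      rw [show [((1:Int), (0:Int)), (-1, 0), (0, 1), (0, -1)] = pvDirsA from rfl]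
      have hqok' : pvQOK par start qs := fun p hp => hqok p (List.mem_cons_of_mem _ hp)
      have hqv' : ∀ p ∈ qs, PySem.Set.contains vis p.1 = true :=
        fun p hp => hqv p (List.mem_cons_of_mem _ hp)
      have HS := pvScan_sync grid R C start tgt? rc first pvDirsA qs vis par
        hgs hqok' hqv' htf hiff hchf
      cases hscan : pvScanB grid (R : Int) (C : Int) tgt? rc first pvDirsA qs vis with
      | inl fb =>
        rw [hscan] at HS
        obtain ⟨t, ht, hts, htm, hgsf, hchf2, hlenf⟩ := HS
        rw [ht]
        apply pvTA grid R C start t fb hts fu _ _ _ hgsf htm hchf2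
        simp only [List.length_cons] at hfu
        omega
      | inr pr =>
        obtain ⟨qB', vis'⟩ := pr
        rw [hscan] at HS
        obtain ⟨he1, he2, hgsf, hqokf, hqvf, htff, hlenf⟩ := HS
        show _ = pvLoopB grid (R : Int) (C : Int) start tgt? fu qB' vis'
        rw [he1, he2]
        apply ih qB' vis' _ hgsf hqokf hqvf htff
        simp only [List.length_cons] at hfu
        omega

-- the two programs agree from their common initial state
theorem pvTop_eq (grid : List (List String)) (s : Int × Int) (t? : Option (Int × Int)) :
    (∀ t, t? = some t → t ≠ s) →
    pvLoopA grid grid.length (grid.headD []).length s t?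
      (grid.length * (grid.headD []).length + 2) [s] (PySem.Set.ofList [s]) PySem.Dict.empty =
    pvLoopB grid grid.length (grid.headD []).length s t?
      (grid.length * (grid.headD []).length + 2) [(s, none)] (PySem.Set.ofList [s]) := by
  intro hne
  have hgs : pvGS ((grid.length : Nat) : Int) (((grid.headD []).length : Nat) : Int) s
      (PySem.Set.ofList [s]) PySem.Dict.empty := by
    refine ⟨?_, ?_, ?_⟩
    · intro k
      simp [PySem.Set.ofList, PySem.Set.add, PySem.Set.contains, PySem.Dict.get?_empty,
        PySem.Set.empty]
    · intro k hk
      rw [PySem.Dict.get?_empty] at hk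
      cases hk
    · rw [PySem.Dict.keys_empty]
      exact List.nodup_nil
  have hqok : pvQOK PySem.Dict.empty s [(s, none)] := by
    intro p hp
    rcases List.mem_singleton.mp hp with rfl
    exact ⟨by simp, fun f hf => by cases hf⟩
  have hqv : ∀ p ∈ [(s, (none : Option (Int × Int)))],
      PySem.Set.contains (PySem.Set.ofList [s]) p.1 = true := by
    intro p hp
    rcases List.mem_singleton.mp hp with rfl
    simp [PySem.Set.ofList, PySem.Set.add, PySem.Set.contains, PySem.Set.empty]
  have htf : pvTF t? s (PySem.Set.ofList [s]) := by
    intro t ht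
    refine ⟨hne t ht, ?_⟩
    simp [PySem.Set.ofList, PySem.Set.add, PySem.Set.contains, PySem.Set.empty, hne t ht]
  have hfu : [(s, (none : Option (Int × Int)))].length +
      grid.length * (grid.headD []).length ≤
      (grid.length * (grid.headD []).length + 2) +
        PySem.Dict.size (PySem.Dict.empty : PySem.Dict (Int × Int) (Int × Int)) := by
    simp [PySem.Dict.size, PySem.Dict.empty]
    omega
  simpa using pvLS grid grid.length (grid.headD []).length s t?
    (grid.length * (grid.headD []).length + 2) [(s, none)] (PySem.Set.ofList [s])
    PySem.Dict.empty hgs hqok hqv htf hfu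

-- A on target = start: the first pop answers immediately
theorem pvTop_self (grid : List (List String)) (s : Int × Int) :
    pvLoopA grid grid.length (grid.headD []).length s (some s)
      (grid.length * (grid.headD []).length + 2) [s] (PySem.Set.ofList [s]) PySem.Dict.empty =
    [s.1, s.2] := by
  show pvLoopA _ _ _ _ _ (_ + 1 + 1) _ _ _ = _
  simp [pvLoopA]

-- ===== VERDICT (by name: the statement is the Claim_ definition above) =====
theorem bfs_next_step_spec : Claim_equal_bfs_next_step := by
  intro grid start target _ hpre
  unfold Spec_bfs_next_step bfs_next_step bfs_next_step_alt pvPairB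
  cases start with
  | nil => rfl
  | cons a t =>
    cases t with
    | nil => rfl
    | cons b t2 =>
      cases t2 with
      | cons c t3 => rfl
      | nil =>
        cases target with
        | nil => simpa using pvTop_eq grid (a, b) none (by simp)
        | cons x t =>
          cases t with
          | nil => simpa using pvTop_eq grid (a, b) none (by simp)
          | cons y t2 =>
            cases t2 with
            | cons z t3 => simpa using pvTop_eq grid (a, b) none (by simp)
            | nil =>
              by_cases hxy : x = a ∧ y = b
              · obtain ⟨h1, h2⟩ := hxy
                subst h1; subst h2
                simpa using pvTop_self grid (x, y)
              · have hne : (x, y) ≠ (a, b) := by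
                  simp only [ne_eq, Prod.mk.injEq]; tauto
                have h := pvTop_eq grid (a, b) (some (x, y))
                  (fun t ht => by injection ht with h; exact h ▸ hne)
                simpa [hxy] using h
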